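-- pv_equiv track=rewrite | github.com/wang264/leetcode_practice | mianshi_bakelai/aaaabb.py | solution
-- ===== SOURCE A (Python) =====
-- def solution(s: str):
--     idx = 0
--     for idx, char in enumerate(s):
--         if char == "a":
--             continue
--         else:
--             break
--
--     # idx point to the location of first b.
--     for i in range(idx, len(s)):
--         if s[i] == "a":
--             return False
--
--     return True
-- ===== SOURCE B (Python) =====
-- def solution(s: str):
--     seen_non_a = False
--     for ch in s:
--         if ch == "a":
--             if seen_non_a:
--                 return False
--         else:
--             seen_non_a = True
--     return seen_non_a or s == ""
-- ===== Notes on version B (the rewrite author's own statement) =====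
-- stated objective: simpler
-- what changed: Replaced A's two sequential scans (enumerate-loop to find the first non-'a', then an index loop re-scanning from there) by one left-to-right pass over the characters maintaining a single seen_non_a flag, with no indexing at all (also measured faster by a constant factor: no s[i] indexing).
import Mathlib
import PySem

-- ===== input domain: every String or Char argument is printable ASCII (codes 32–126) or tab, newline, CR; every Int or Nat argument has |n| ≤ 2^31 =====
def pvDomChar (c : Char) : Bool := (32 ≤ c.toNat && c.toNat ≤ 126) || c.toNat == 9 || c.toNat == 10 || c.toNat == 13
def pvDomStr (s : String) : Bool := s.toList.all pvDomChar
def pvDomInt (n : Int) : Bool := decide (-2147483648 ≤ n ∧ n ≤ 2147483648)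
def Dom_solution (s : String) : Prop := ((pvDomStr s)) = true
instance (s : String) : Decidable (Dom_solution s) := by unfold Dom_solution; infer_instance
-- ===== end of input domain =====

-- B replaces A's two sequential scans by one pass with a seen-non-'a' flag; objective: simpler.

-- ===== PORT A =====
-- first loop: `for idx, char in enumerate(s): if char == "a": continue else: break`
def pvALoop : List (Int × Char) → Int → Int
  | [], idx => idx
  | (i, c) :: rest, _ => if c = 'a' then pvALoop rest i else i

-- second loop: `for i in range(idx, len(s)): if s[i] == "a": return False`
-- (the `none` branch is Python's IndexError; unreachable since i < len(s))
def pvBLoop (cs : List Char) : List Int → Bool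
  | [] => true
  | i :: rest =>
    match PySem.List.pyGet? cs i with
    | some c => if c = 'a' then false else pvBLoop cs rest
    | none => true

def solution (s : String) : Bool :=
  pvBLoop s.toList
    (PySem.List.pyRange (pvALoop (PySem.List.enumerate s.toList 0) 0) (PySem.List.len s.toList) 1)

-- ===== PORT B =====
-- the single pass; early `return False` is the `false` branch, the final
-- `return seen_non_a or s == ""` is the `[]` case (isEmpty = (s == ""))
def pvAltGo : List Char → Bool → Bool → Bool
  | [], seen, isEmpty => seen || isEmpty
  | c :: rest, seen, isEmpty =>
    if c = 'a' then (if seen then false else pvAltGo rest seen isEmpty)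
    else pvAltGo rest true isEmpty

def solution_alt (s : String) : Bool := pvAltGo s.toList false (s == "")

-- ===== PRECONDITION & SPEC =====
def Spec_solution (s : String) (out : Bool) : Prop := out = solution_alt s
instance (s : String) (out : Bool) : Decidable (Spec_solution s out) := by unfold Spec_solution; infer_instance

-- ===== CLAIM (what is proved, stated in full; the proofs are below) =====
def Claim_equal_solution : Prop := ∀ (s : String), Dom_solution s → Spec_solution s (solution s)

-- ===== LEMMAS AND PROOFS =====

-- common characterisation of both programs on a nonempty character list
def pvSpec : List Char → Bool
  | [] => true
  | c :: rest =>
    if c = 'a' then (if rest = [] then false else pvSpec rest)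
    else !(rest.contains 'a')

-- index computed by A's first loop, as a Nat
def pvNIdx : List Char → Nat
  | [] => 0
  | [_] => 0
  | c :: rest => if c = 'a' then pvNIdx rest + 1 else 0

lemma pvAltGo_true (cs : List Char) : pvAltGo cs true false = !(cs.contains 'a') := by
  induction cs with
  | nil => simp [pvAltGo]
  | cons c rest ih =>
    by_cases h : c = 'a'
    · simp [pvAltGo, h]
    · simp only [pvAltGo, if_neg h, ih]
      simp [eq_comm, h]

lemma pvAltGo_spec (cs : List Char) (h : cs ≠ []) : pvAltGo cs false false = pvSpec cs := by
  induction cs with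
  | nil => exact absurd rfl h
  | cons c rest ih =>
    by_cases hc : c = 'a'
    · rcases rest with _ | ⟨d, rest'⟩
      · simp [pvAltGo, pvSpec, hc]
      · have h1 : pvAltGo (c :: d :: rest') false false = pvAltGo (d :: rest') false false := by
          simp [pvAltGo, hc]
        rw [h1, ih (by simp)]
        subst hc
        rw [show pvSpec ('a' :: d :: rest') = pvSpec (d :: rest') from by
          simp only [pvSpec]
          rw [if_pos trivial, if_neg (List.cons_ne_nil d rest')]]
    · simp only [pvAltGo, if_neg hc, pvAltGo_true, pvSpec]

lemma pvBLoop_range (cs : List Char) : ∀ (a : Nat),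
    pvBLoop cs (PySem.List.pyRange a cs.length 1) = !((cs.drop a).contains 'a') := by
  intro a
  induction hn : cs.length - a generalizing a with
  | zero =>
    have hle : cs.length ≤ a := by omega
    rw [PySem.List.pyRange_one_eq_nil (by exact_mod_cast hle)]
    simp [pvBLoop, List.drop_eq_nil_of_le hle]
  | succ n ih =>
    have hlt : a < cs.length := by omega
    rw [PySem.List.pyRange_one_cons (by exact_mod_cast hlt)]
    have hget : PySem.List.pyGet? cs (a : Int) = some cs[a] := by
      simp [PySem.List.pyGet?_natCast, List.getElem?_eq_getElem hlt]
    have hdrop : cs.drop a = cs[a] :: cs.drop (a + 1) := List.drop_eq_getElem_cons hlt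
    have hcast : (a : Int) + 1 = ((a + 1 : Nat) : Int) := by push_cast; ring
    by_cases hc : cs[a] = 'a'
    · rw [hdrop]
      simp [pvBLoop, hget, hc]
    · have hbeq : ('a' == cs[a]) = false := by
        rw [beq_eq_false_iff_ne]
        exact fun he => hc he.symm
      simp only [pvBLoop, hget, if_neg hc, hcast, ih (a + 1) (by omega)]
      rw [hdrop, List.contains_cons, hbeq, Bool.false_or]

lemma pvALoop_shift (cs : List Char) (h : cs ≠ []) : ∀ (s prev : Int),
    pvALoop (PySem.List.enumerate cs s) prev = s + pvALoop (PySem.List.enumerate cs 0) 0 := by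
  induction cs with
  | nil => exact absurd rfl h
  | cons c rest ih =>
    intro s prev
    rcases rest with _ | ⟨d, rest'⟩
    · by_cases hc : c = 'a' <;>
        simp [PySem.List.enumerate_cons, PySem.List.enumerate_nil, pvALoop, hc]
    · by_cases hc : c = 'a'
      · subst hc
        rw [PySem.List.enumerate_cons 'a' (d :: rest') s,
          PySem.List.enumerate_cons 'a' (d :: rest') 0]
        simp only [pvALoop, if_true]
        rw [ih (by simp) (s + 1) s, ih (by simp) (0 + 1) 0]
        ring
      · simp [PySem.List.enumerate_cons, pvALoop, hc]

lemma pvALoop_eq_nIdx (cs : List Char) :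
    pvALoop (PySem.List.enumerate cs 0) 0 = (pvNIdx cs : Int) := by
  induction cs with
  | nil => simp [PySem.List.enumerate_nil, pvALoop, pvNIdx]
  | cons c rest ih =>
    rcases rest with _ | ⟨d, rest'⟩
    · by_cases hc : c = 'a' <;>
        simp [PySem.List.enumerate_cons, PySem.List.enumerate_nil, pvALoop, pvNIdx, hc]
    · by_cases hc : c = 'a'
      · subst hc
        rw [PySem.List.enumerate_cons 'a' (d :: rest') 0]
        simp only [pvALoop, pvNIdx]
        rw [pvALoop_shift (d :: rest') (by simp) (0 + 1) 0, ih]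
        push_cast; ring
      · simp [PySem.List.enumerate_cons, pvALoop, pvNIdx, hc]

lemma pvDrop_nIdx (cs : List Char) (h : cs ≠ []) :
    (!((cs.drop (pvNIdx cs)).contains 'a')) = pvSpec cs := by
  induction cs with
  | nil => exact absurd rfl h
  | cons c rest ih =>
    rcases rest with _ | ⟨d, rest'⟩
    · by_cases hc : c = 'a'
      · simp [pvNIdx, pvSpec, hc]
      · simp only [pvNIdx, pvSpec, if_neg hc, List.drop_zero]
        simp [eq_comm, hc]
    · by_cases hc : c = 'a'
      · have h1 : pvNIdx (c :: d :: rest') = pvNIdx (d :: rest') + 1 := by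
          simp [pvNIdx, hc]
        have h2 : pvSpec (c :: d :: rest') = pvSpec (d :: rest') := by
          subst hc
          simp only [pvSpec]
          rw [if_pos trivial, if_neg (List.cons_ne_nil d rest')]
        rw [h1, h2, List.drop_succ_cons, ih (by simp)]
      · simp only [pvNIdx, if_neg hc, List.drop_zero, pvSpec]
        simp [eq_comm, hc]

lemma pvSolution_eq (s : String) : solution s = solution_alt s := by
  unfold solution solution_alt
  by_cases hcs : s.toList = []
  · have hs : s = "" := String.toList_eq_nil_iff.mp hcs
    rw [hcs]
    simp [hs, PySem.List.enumerate_nil, pvALoop, PySem.List.len,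
      PySem.List.pyRange_one_eq_nil (by norm_num : (0:Int) ≤ 0), pvBLoop, pvAltGo]
  · have hemp : (s == "") = false := by
      simp only [beq_eq_false_iff_ne, ne_eq]
      intro h; rw [h] at hcs; simp at hcs
    rw [hemp, pvALoop_eq_nIdx, PySem.List.len_eq]
    rw [pvBLoop_range s.toList (pvNIdx s.toList), pvDrop_nIdx s.toList hcs,
      pvAltGo_spec s.toList hcs]

-- ===== VERDICT (by name: the statement is the Claim_ definition above) =====
theorem solution_spec : Claim_equal_solution := by
  intro s _
  unfold Spec_solution
  exact pvSolution_eq s
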